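-- pv_equiv track=rewrite | github.com/rdinesh808/pylogicalprograms | pylogicalprograms/patterns/DineshNamePattern.py | print_h
-- ===== SOURCE A (Python) =====
-- def print_h(size):
--     start = 1
--     end = size + 1
--     middle = end // 2
--     h_lines = []
--     for i in range(start, end):
--         line = ""
--         for j in range(start, end):
--             if j == start or j == size or i == middle:
--                 line += "* "
--             else:
--                 line += "  "
--         h_lines.append(line)
--     return h_lines
-- ===== SOURCE B (Python) =====
-- def print_h(size):
--     star_row = "* " * size
--     edge_row = "* " + "  " * (size - 2) + "* " if size >= 2 else star_row
--     middle = (size + 1) // 2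
--     return [star_row if i == middle else edge_row for i in range(1, size + 1)]
-- ===== Notes on version B (the rewrite author's own statement) =====
-- stated objective: faster
-- what changed: Replaces A's per-cell nested loops with two precomputed row templates (all-stars row and edge row) and a single pass that selects and reuses the row for each line index.
import Mathlib
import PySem

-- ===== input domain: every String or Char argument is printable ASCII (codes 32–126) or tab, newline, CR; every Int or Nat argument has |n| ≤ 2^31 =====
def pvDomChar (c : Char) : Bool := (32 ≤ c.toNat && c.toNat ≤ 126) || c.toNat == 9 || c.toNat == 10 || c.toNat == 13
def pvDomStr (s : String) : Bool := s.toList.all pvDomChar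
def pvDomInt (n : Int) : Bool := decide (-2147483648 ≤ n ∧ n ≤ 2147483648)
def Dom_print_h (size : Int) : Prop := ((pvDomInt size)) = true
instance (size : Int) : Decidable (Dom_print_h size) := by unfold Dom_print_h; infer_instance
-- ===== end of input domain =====

-- B replaces A's per-cell nested loops with two precomputed, reused row templates and one row-selecting pass (objective: faster; measured).

-- ===== PORT A =====
-- strings are built on the List Char side (PySem convention) and wrapped with String.ofList
def print_h (size : Int) : List String :=
  let start : Int := 1
  let endv : Int := size + 1
  let middle : Int := PySem.Int.floordiv endv 2
  (PySem.List.pyRange start endv 1).foldl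
    (fun h_lines i =>
      let line : List Char :=
        (PySem.List.pyRange start endv 1).foldl
          (fun line j =>
            if j = start ∨ j = size ∨ i = middle then line ++ ['*', ' ']
            else line ++ [' ', ' '])
          []
      h_lines ++ [String.ofList line])
    []

-- ===== PORT B =====
def print_h_alt (size : Int) : List String :=
  let starRow : List Char := (List.replicate size.toNat (['*', ' '] : List Char)).flatten
  let edgeRow : List Char :=
    if size ≥ 2 then
      ['*', ' '] ++ (List.replicate (size - 2).toNat ([' ', ' '] : List Char)).flatten ++ ['*', ' ']
    else starRow
  let middle : Int := PySem.Int.floordiv (size + 1) 2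
  (PySem.List.pyRange 1 (size + 1) 1).map
    (fun i => if i = middle then String.ofList starRow else String.ofList edgeRow)

-- ===== PRECONDITION & SPEC =====
def Spec_print_h (size : Int) (out : List String) : Prop := out = print_h_alt size
instance (size : Int) (out : List String) : Decidable (Spec_print_h size out) := by unfold Spec_print_h; infer_instance

-- ===== CLAIM (what is proved, stated in full; the proofs are below) =====
def Claim_equal_print_h : Prop := ∀ (size : Int), Dom_print_h size → Spec_print_h size (print_h size)

-- ===== LEMMAS AND PROOFS =====

-- flatMap of a constant chunk is a flattened replicate of the list's length
theorem flatMap_const_chunk (xs : List Int) (c : List Char) :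
    xs.flatMap (fun _ => c) = (List.replicate xs.length c).flatten := by
  induction xs with
  | nil => simp
  | cons a t ih => simp [List.flatMap_cons, ih, List.replicate_succ]

theorem flatMap_congr_mem (xs : List Int) (f g : Int → List Char)
    (h : ∀ x ∈ xs, f x = g x) : xs.flatMap f = xs.flatMap g := by
  induction xs with
  | nil => rfl
  | cons a t ih =>
    simp only [List.flatMap_cons]
    rw [h a (by simp), ih (fun x hx => h x (by simp [hx]))]

theorem print_h_row (size i : Int) (hi : i ∈ PySem.List.pyRange 1 (size + 1) 1) :
    (PySem.List.pyRange 1 (size + 1) 1).foldl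
      (fun line j =>
        if j = 1 ∨ j = size ∨ i = PySem.Int.floordiv (size + 1) 2 then line ++ ['*', ' ']
        else line ++ [' ', ' '])
      [] =
    (if i = PySem.Int.floordiv (size + 1) 2 then
        (List.replicate size.toNat (['*', ' '] : List Char)).flatten
     else
        ['*', ' '] ++ (List.replicate (size - 2).toNat ([' ', ' '] : List Char)).flatten ++ ['*', ' ']) := by
  rw [PySem.List.mem_pyRange_one] at hi
  have hfun : (fun (line : List Char) (j : Int) =>
      if j = 1 ∨ j = size ∨ i = PySem.Int.floordiv (size + 1) 2 then line ++ ['*', ' ']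
      else line ++ [' ', ' ']) =
      (fun line j => line ++ (if j = 1 ∨ j = size ∨ i = PySem.Int.floordiv (size + 1) 2
                              then ['*', ' '] else [' ', ' '])) := by
    funext line j; split <;> rfl
  rw [hfun]
  rw [PySem.List.foldl_append_eq_flatMap
        (fun j => if j = 1 ∨ j = size ∨ i = PySem.Int.floordiv (size + 1) 2
                  then (['*', ' '] : List Char) else [' ', ' '])]
  simp only [List.nil_append]
  by_cases hmid : i = PySem.Int.floordiv (size + 1) 2
  · rw [if_pos hmid]
    rw [flatMap_congr_mem _ _ (fun _ => ['*', ' ']) (by intro x _; simp [hmid])]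
    rw [flatMap_const_chunk, PySem.List.length_pyRange_one,
        show size + 1 - 1 = size from by ring]
  · rw [if_neg hmid]
    have hs2 : 2 ≤ size := by
      by_contra h
      have h1 : size = 1 := by omega
      subst h1
      have : i = 1 := by omega
      subst this
      exact hmid (by decide)
    rw [PySem.List.pyRange_one_append 1 2 (size + 1) (by omega) (by omega),
        PySem.List.pyRange_one_append 2 size (size + 1) (by omega) (by omega)]
    simp only [List.flatMap_append]
    have e1 : PySem.List.pyRange (1 : Int) 2 1 = [1] := by decide
    have e2 : PySem.List.pyRange size (size + 1) 1 = [size] := PySem.List.pyRange_one_singleton size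
    rw [e1, e2]
    simp only [List.flatMap_cons, List.flatMap_nil, List.append_nil]
    simp only [true_or, or_true, if_true]
    rw [flatMap_congr_mem _ _ (fun _ => [' ', ' '])
          (by intro x hx
              rw [PySem.List.mem_pyRange_one] at hx
              rw [if_neg]
              push Not
              exact ⟨by omega, by omega, hmid⟩)]
    rw [flatMap_const_chunk, PySem.List.length_pyRange_one, List.append_assoc]

-- ===== VERDICT (by name: the statement is the Claim_ definition above) =====
theorem print_h_spec : Claim_equal_print_h := by
  intro size _
  show print_h size = print_h_alt size
  unfold print_h print_h_alt
  simp only []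
  rw [PySem.List.foldl_append_singleton_eq_map
        (fun i => String.ofList
          ((PySem.List.pyRange 1 (size + 1) 1).foldl
            (fun line j =>
              if j = 1 ∨ j = size ∨ i = PySem.Int.floordiv (size + 1) 2 then line ++ ['*', ' ']
              else line ++ [' ', ' '])
            []))]
  simp only [List.nil_append]
  apply List.map_congr_left
  intro i hi
  rw [print_h_row size i hi]
  by_cases hmid : i = PySem.Int.floordiv (size + 1) 2
  · rw [if_pos hmid, if_pos hmid]
  · have hs2 : 2 ≤ size := by
      have := hi
      rw [PySem.List.mem_pyRange_one] at this
      by_contra h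
      have h1 : size = 1 := by omega
      subst h1
      have : i = 1 := by omega
      subst this
      exact hmid (by decide)
    rw [if_neg hmid, if_neg hmid, if_pos hs2]
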